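-- pv_equiv track=rewrite | github.com/914RobbLeustean/UniProjects | Semester01/FundamentalsOfProgramming/Labs/a5-914RobbLeustean/src/program.py | find_longest_base10
-- ===== SOURCE A (Python) =====
-- def get_real(number) -> int:
--     return number[0] #returning the real part of number (first element of the list)
--
-- def get_imaginary(number) -> int:
--     return number[1] #returning the img part of number (2nd element of the list)
--
-- def find_longest_base10(numbers: list):
--     n = len(numbers)
--     max_length = start_index = stop_index = 0
--     longest_base10 = []
--
--     for i in range(n):
--         for j in range(i + 2, n + 1):
--             subsequence = numbers[i:j]
--
--             # Check if the subsequence respects the propriety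
--             if has_same_base10_digits(subsequence) and len(subsequence) > max_length:
--                 max_length = len(subsequence)
--                 start_index = i
--                 stop_index = j
--
--     longest_base10 = numbers[start_index:stop_index]
--
--     return max_length, longest_base10
--
-- def has_same_base10_digits(subsequence):
--     for num in subsequence:
--         real_digits = set(str(get_real(num))) #convert the real digits into a string and make it a set
--         imag_digits = set(str(get_imaginary(num))) #same goes for img digits
--
--         if not real_digits.isdisjoint(imag_digits): #checking if there are common elements between them
--             return True
--
--     return False
-- ===== SOURCE B (Python) =====
-- def _shares(num):
--     real, imag = str(num[0]), str(num[1])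
--     return any(c in imag for c in real)
--
-- def find_longest_base10(numbers: list):
--     n = len(numbers)
--     if n >= 2 and any(_shares(num) for num in numbers):
--         return n, numbers[:]
--     return 0, []
-- ===== Notes on version B (the rewrite author's own statement) =====
-- stated objective: faster
-- what changed: A enumerates every contiguous subsequence of length >= 2 and rescans each one for a digit-sharing element (cubic-plus scans); since any qualifying subsequence can be extended to the whole list, B makes one short-circuiting pass over the elements and returns the whole list (or (0, [])).
-- outside the precondition, e.g. on find_longest_base10([[1, 1], [5]]): A returns (2, [[1, 1], [5]]), B returns (2, [[1, 1], [5]])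
import Mathlib
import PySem

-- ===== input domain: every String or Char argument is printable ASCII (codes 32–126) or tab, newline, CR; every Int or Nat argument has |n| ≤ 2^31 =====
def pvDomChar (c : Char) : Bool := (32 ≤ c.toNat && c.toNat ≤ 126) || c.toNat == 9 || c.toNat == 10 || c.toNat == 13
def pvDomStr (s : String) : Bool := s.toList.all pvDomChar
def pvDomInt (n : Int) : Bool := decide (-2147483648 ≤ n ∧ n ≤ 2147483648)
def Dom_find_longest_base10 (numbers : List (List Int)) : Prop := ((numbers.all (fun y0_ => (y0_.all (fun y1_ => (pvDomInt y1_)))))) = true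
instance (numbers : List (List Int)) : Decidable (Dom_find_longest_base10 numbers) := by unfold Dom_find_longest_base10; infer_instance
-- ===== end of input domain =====

-- B replaces A's enumeration of all contiguous subsequences (with a rescan of each) by one
-- short-circuiting pass over the elements: any qualifying subsequence extends to the whole list.


-- ===== PORT A =====
-- number[0] / number[1]; Python raises IndexError on a shorter list — Pre_ excludes those
-- inputs, so the getD default is never consulted on admitted inputs.
def pvGetReal (number : List Int) : Int := PySem.List.pyGetD number 0 0

def pvGetImag (number : List Int) : Int := PySem.List.pyGetD number 1 0

def has_same_base10_digits : List (List Int) → Bool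
  | [] => false
  | num :: rest =>
    let real_digits : PySem.Set Char := PySem.Set.ofList (PySem.Int.toChars (pvGetReal num))
    let imag_digits : PySem.Set Char := PySem.Set.ofList (PySem.Int.toChars (pvGetImag num))
    if ¬ (PySem.Set.isdisjoint real_digits imag_digits = true) then true
    else has_same_base10_digits rest

def find_longest_base10 (numbers : List (List Int)) : Int × List (List Int) :=
  let n : Int := numbers.length
  let st : Int × Int × Int :=
    (PySem.List.pyRange 0 n 1).foldl (fun acc i =>
      (PySem.List.pyRange (i + 2) (n + 1) 1).foldl (fun acc j =>
        let subsequence := PySem.List.slice numbers (some i) (some j)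
        if has_same_base10_digits subsequence = true ∧ (subsequence.length : Int) > acc.1 then
          ((subsequence.length : Int), i, j)
        else acc) acc) (0, 0, 0)
  (st.1, PySem.List.slice numbers (some st.2.1) (some st.2.2))

-- ===== PORT B =====
def pvShares (num : List Int) : Bool :=
  (PySem.Int.toChars (PySem.List.pyGetD num 0 0)).any
    (fun c => (PySem.Int.toChars (PySem.List.pyGetD num 1 0)).contains c)

def find_longest_base10_alt (numbers : List (List Int)) : Int × List (List Int) :=
  if 2 ≤ numbers.length ∧ numbers.any pvShares = true then
    ((numbers.length : Int), numbers)
  else (0, [])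

-- ===== PRECONDITION & SPEC =====
-- Pre_ excludes lists of length ≥ 2 containing an element of length < 2: on most of those A
-- raises IndexError reading num[1]; on some, an earlier digit-sharing element shields the short
-- one from ever being inspected and A still returns — B returns the same value there.
def Pre_find_longest_base10 (numbers : List (List Int)) : Prop :=
  numbers.length < 2 ∨ ∀ num ∈ numbers, 2 ≤ num.length
instance (numbers : List (List Int)) : Decidable (Pre_find_longest_base10 numbers) := by
  unfold Pre_find_longest_base10; infer_instance

def pvWitness_find_longest_base10 : List (List Int) := [[12, 21], [3, 4]]

def Spec_find_longest_base10 (numbers : List (List Int)) (out : Int × List (List Int)) : Prop := out = find_longest_base10_alt numbers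
instance (numbers : List (List Int)) (out : Int × List (List Int)) : Decidable (Spec_find_longest_base10 numbers out) := by unfold Spec_find_longest_base10; infer_instance

-- ===== CLAIM (what is proved, stated in full; the proofs are below) =====
def Claim_equal_find_longest_base10 : Prop := ∀ (numbers : List (List Int)), Dom_find_longest_base10 numbers → Pre_find_longest_base10 numbers → Spec_find_longest_base10 numbers (find_longest_base10 numbers)

-- ===== LEMMAS AND PROOFS =====

lemma hs_eq_any (L : List (List Int)) : has_same_base10_digits L = L.any pvShares := by
  induction L with
  | nil => rfl
  | cons num rest ih =>
    simp only [has_same_base10_digits, List.any_cons, ih]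
    by_cases h : pvShares num = true
    · have : ¬ (PySem.Set.isdisjoint (PySem.Set.ofList (PySem.Int.toChars (pvGetReal num)))
          (PySem.Set.ofList (PySem.Int.toChars (pvGetImag num))) = true) := by
        rw [PySem.Set.isdisjoint_iff]
        simp only [pvShares, List.any_eq_true, List.contains_iff_mem] at h
        obtain ⟨c, hc1, hc2⟩ := h
        intro hd
        exact hd c (by simp [PySem.Set.mem_ofList, pvGetReal, hc1]) (by simp [PySem.Set.mem_ofList, pvGetImag, hc2])
      simp [this, h]
    · have : PySem.Set.isdisjoint (PySem.Set.ofList (PySem.Int.toChars (pvGetReal num)))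
          (PySem.Set.ofList (PySem.Int.toChars (pvGetImag num))) = true := by
        rw [PySem.Set.isdisjoint_iff]
        intro c hc1 hc2
        simp only [PySem.Set.mem_ofList] at hc1 hc2
        apply h
        simp only [pvShares, List.any_eq_true]
        exact ⟨c, by simpa [pvGetReal] using hc1, by simpa [pvGetImag] using hc2⟩
      simp [this, h]

lemma foldl_id_of {α β : Type} (L : List β) (f : α → β → α) (a : α)
    (h : ∀ acc x, x ∈ L → f acc x = acc) : L.foldl f a = a := by
  induction L generalizing a with
  | nil => rfl
  | cons x xs ih =>
    rw [List.foldl_cons, h a x (by simp)]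
    exact ih a (fun acc y hy => h acc y (by simp [hy]))

lemma foldl_pres {α β : Type} {P : α → Prop} (L : List β) (f : α → β → α)
    (h : ∀ acc x, x ∈ L → P acc → P (f acc x)) (a : α) (ha : P a) : P (L.foldl f a) := by
  induction L generalizing a with
  | nil => exact ha
  | cons x xs ih =>
    exact ih (fun acc y hy => h acc y (by simp [hy])) _ (h a x (by simp) ha)

-- length of numbers[i:j] is at most j - i and at most len(numbers) - i, for 0 <= i <= j
lemma slice_len_le (numbers : List (List Int)) (i j : Int) (hi : 0 ≤ i) (hij : i ≤ j)
    (hil : i ≤ (numbers.length : Int)) :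
    ((PySem.List.slice numbers (some i) (some j)).length : Int) ≤ j - i ∧
    ((PySem.List.slice numbers (some i) (some j)).length : Int) ≤ (numbers.length : Int) - i := by
  have hj : 0 ≤ j := le_trans hi hij
  rw [PySem.List.slice_toNat numbers hi hj]
  simp only [List.length_take, List.length_drop]
  constructor <;> omega

theorem find_longest_base10_spec_aux : ∀ (numbers : List (List Int)),
    Pre_find_longest_base10 numbers →
    find_longest_base10 numbers = find_longest_base10_alt numbers := by
  intro numbers _
  by_cases hn : 2 ≤ numbers.length
  · have hN2 : (2 : Int) ≤ (numbers.length : Int) := by exact_mod_cast hn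
    have hslice : PySem.List.slice numbers (some (0 : Int)) (some ((numbers.length : Int))) = numbers := by
      rw [PySem.List.slice_zero_start, PySem.List.slice_to numbers (by omega)]
      simp
    by_cases hg : numbers.any pvShares = true
    · -- some element shares digits: A's state converges to (n, 0, n)
      unfold find_longest_base10 find_longest_base10_alt
      rw [if_pos ⟨hn, hg⟩]
      simp only []
      rw [PySem.List.pyRange_one_cons (by omega : (0:Int) < (numbers.length : Int)),
          List.foldl_cons]
      have hinner : (PySem.List.pyRange ((0:Int) + 2) ((numbers.length : Int) + 1) 1).foldl
          (fun (acc : Int × Int × Int) j =>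
            if has_same_base10_digits (PySem.List.slice numbers (some 0) (some j)) = true ∧
                ((PySem.List.slice numbers (some 0) (some j)).length : Int) > acc.1 then
              (((PySem.List.slice numbers (some 0) (some j)).length : Int), (0 : Int), j)
            else acc) ((0 : Int), (0 : Int), (0 : Int)) =
          ((numbers.length : Int), 0, (numbers.length : Int)) := by
        rw [PySem.List.pyRange_one_append ((0:Int) + 2) (numbers.length : Int)
              ((numbers.length : Int) + 1) (by omega) (by omega),
            List.foldl_append,
            PySem.List.pyRange_one_cons
              (by omega : ((numbers.length : Int)) < (numbers.length : Int) + 1)]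
        have hrest : PySem.List.pyRange ((numbers.length : Int) + 1) ((numbers.length : Int) + 1) 1
            = [] := by
          refine List.eq_nil_iff_forall_not_mem.mpr (fun x hx => ?_)
          rw [PySem.List.mem_pyRange_one] at hx
          omega
        rw [hrest]
        set mid := (PySem.List.pyRange ((0:Int) + 2) ((numbers.length : Int)) 1).foldl
            (fun (acc : Int × Int × Int) j =>
              if has_same_base10_digits (PySem.List.slice numbers (some 0) (some j)) = true ∧
                  ((PySem.List.slice numbers (some 0) (some j)).length : Int) > acc.1 then
                (((PySem.List.slice numbers (some 0) (some j)).length : Int), (0 : Int), j)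
              else acc) ((0 : Int), (0 : Int), (0 : Int)) with hmiddef
        have hmidlt : mid.1 < (numbers.length : Int) := by
          rw [hmiddef]
          apply foldl_pres (P := fun st : Int × Int × Int => st.1 < (numbers.length : Int))
          · intro acc j hj hacc
            rw [PySem.List.mem_pyRange_one] at hj
            split_ifs with h
            · have := (slice_len_le numbers 0 j (by omega) (by omega) (by omega)).1
              omega
            · exact hacc
          · omega
        simp only [List.foldl_cons, List.foldl_nil, hslice]
        rw [if_pos ⟨by rw [hs_eq_any]; exact hg, hmidlt⟩]
      rw [hinner]
      have houter : (PySem.List.pyRange ((0:Int) + 1) (numbers.length : Int) 1).foldl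
          (fun (acc : Int × Int × Int) i =>
            (PySem.List.pyRange (i + 2) ((numbers.length : Int) + 1) 1).foldl
              (fun (acc : Int × Int × Int) j =>
                if has_same_base10_digits (PySem.List.slice numbers (some i) (some j)) = true ∧
                    ((PySem.List.slice numbers (some i) (some j)).length : Int) > acc.1 then
                  (((PySem.List.slice numbers (some i) (some j)).length : Int), i, j)
                else acc) acc)
          ((numbers.length : Int), 0, (numbers.length : Int)) =
          ((numbers.length : Int), 0, (numbers.length : Int)) := by
        apply foldl_pres
          (P := fun st : Int × Int × Int => st = ((numbers.length : Int), 0, (numbers.length : Int)))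
        · intro acc i hi hacc
          rw [PySem.List.mem_pyRange_one] at hi
          apply foldl_pres
            (P := fun st : Int × Int × Int => st = ((numbers.length : Int), 0, (numbers.length : Int)))
          · intro acc' j hj hacc'
            rw [PySem.List.mem_pyRange_one] at hj
            rw [if_neg, hacc']
            rintro ⟨-, hgt⟩
            have := (slice_len_le numbers i j (by omega) (by omega) (by omega)).2
            rw [hacc'] at hgt
            simp only [] at hgt
            omega
          · exact hacc
        · rfl
      rw [houter]
      simp [hslice]
    · -- no element shares digits: every iteration keeps (0, 0, 0)
      unfold find_longest_base10 find_longest_base10_alt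
      rw [if_neg (by rintro ⟨-, h⟩; exact hg h)]
      simp only []
      have hz : (PySem.List.pyRange 0 (numbers.length : Int) 1).foldl
          (fun (acc : Int × Int × Int) i =>
            (PySem.List.pyRange (i + 2) ((numbers.length : Int) + 1) 1).foldl
              (fun (acc : Int × Int × Int) j =>
                if has_same_base10_digits (PySem.List.slice numbers (some i) (some j)) = true ∧
                    ((PySem.List.slice numbers (some i) (some j)).length : Int) > acc.1 then
                  (((PySem.List.slice numbers (some i) (some j)).length : Int), i, j)
                else acc) acc) ((0 : Int), (0 : Int), (0 : Int))
          = ((0 : Int), (0 : Int), (0 : Int)) := by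
        apply foldl_id_of
        intro acc i _
        apply foldl_id_of
        intro acc' j _
        rw [if_neg]
        rintro ⟨hs, -⟩
        rw [hs_eq_any, List.any_eq_true] at hs
        rw [List.any_eq_true] at hg
        obtain ⟨x, hx, hpx⟩ := hs
        exact hg ⟨x, PySem.List.mem_of_mem_slice numbers (some i) (some j) hx, hpx⟩
      rw [hz]
      rw [PySem.List.slice_zero_start, PySem.List.slice_to numbers (by omega : (0:Int) ≤ 0)]
      rfl
  · -- n < 2: the inner range of every outer iteration is empty, both sides are (0, [])
    unfold find_longest_base10 find_longest_base10_alt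
    rw [if_neg (by rintro ⟨h, -⟩; omega)]
    simp only []
    have hz : (PySem.List.pyRange 0 (numbers.length : Int) 1).foldl
        (fun (acc : Int × Int × Int) i =>
          (PySem.List.pyRange (i + 2) ((numbers.length : Int) + 1) 1).foldl
            (fun (acc : Int × Int × Int) j =>
              if has_same_base10_digits (PySem.List.slice numbers (some i) (some j)) = true ∧
                  ((PySem.List.slice numbers (some i) (some j)).length : Int) > acc.1 then
                (((PySem.List.slice numbers (some i) (some j)).length : Int), i, j)
              else acc) acc) ((0 : Int), (0 : Int), (0 : Int))
        = ((0 : Int), (0 : Int), (0 : Int)) := by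
      apply foldl_id_of
      intro acc i hi
      rw [PySem.List.mem_pyRange_one] at hi
      have he : PySem.List.pyRange (i + 2) ((numbers.length : Int) + 1) 1 = [] := by
        refine List.eq_nil_iff_forall_not_mem.mpr (fun x hx => ?_)
        rw [PySem.List.mem_pyRange_one] at hx
        omega
      rw [he, List.foldl_nil]
    rw [hz]
    rw [PySem.List.slice_zero_start, PySem.List.slice_to numbers (by omega : (0:Int) ≤ 0)]
    rfl

-- ===== VERDICT (by name: the statement is the Claim_ definition above) =====
theorem find_longest_base10_spec : Claim_equal_find_longest_base10 := by
  intro numbers _ hpre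
  exact find_longest_base10_spec_aux numbers hpre
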